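-- pv_equiv track=rewrite | github.com/Man-Zo0/Algorithm | 프로그래머스 위클리 챌린지 8월1주.py | solution
-- ===== SOURCE A (Python) =====
-- def solution(price, money, count):
--     cnt = 0
--     for i in range(1,count+1):
--         cnt += i
--
--     answer = (cnt * price) - money
--     if answer < 0:
--         return 0
--     else:
--         return answer
-- ===== SOURCE B (Python) =====
-- def solution(price, money, count):
--     rides = count if count > 0 else 0
--     return max(rides * (rides + 1) // 2 * price - money, 0)
-- ===== Notes on version B (the rewrite author's own statement) =====
-- stated objective: faster
-- what changed: Replaced the O(count) summation loop 1+2+...+count by the closed-form arithmetic-series formula count*(count+1)//2 and the branch by max(.,0).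
import Mathlib
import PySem

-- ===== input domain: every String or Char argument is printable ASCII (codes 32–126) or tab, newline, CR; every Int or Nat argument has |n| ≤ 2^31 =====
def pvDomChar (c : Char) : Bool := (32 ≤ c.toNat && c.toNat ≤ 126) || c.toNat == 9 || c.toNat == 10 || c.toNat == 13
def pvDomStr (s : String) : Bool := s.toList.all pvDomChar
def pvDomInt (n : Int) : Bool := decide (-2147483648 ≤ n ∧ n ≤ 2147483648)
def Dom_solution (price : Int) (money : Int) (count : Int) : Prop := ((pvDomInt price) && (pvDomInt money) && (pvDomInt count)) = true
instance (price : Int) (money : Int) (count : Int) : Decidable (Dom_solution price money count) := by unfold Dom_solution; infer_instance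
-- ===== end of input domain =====

-- B replaces A's O(count) summation loop by the closed-form arithmetic-series formula (objective: faster).

-- ===== PORT A =====
def solution (price : Int) (money : Int) (count : Int) : Int :=
  let cnt : Int := (PySem.List.pyRange 1 (count + 1) 1).foldl (fun acc i => acc + i) 0
  let answer : Int := cnt * price - money
  if answer < 0 then 0 else answer

-- ===== PORT B =====
def solution_alt (price : Int) (money : Int) (count : Int) : Int :=
  let rides : Int := if count > 0 then count else 0
  max (PySem.Int.floordiv (rides * (rides + 1)) 2 * price - money) 0

-- ===== PRECONDITION & SPEC =====
def Spec_solution (price : Int) (money : Int) (count : Int) (out : Int) : Prop := out = solution_alt price money count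
instance (price : Int) (money : Int) (count : Int) (out : Int) : Decidable (Spec_solution price money count out) := by unfold Spec_solution; infer_instance

-- ===== CLAIM (what is proved, stated in full; the proofs are below) =====
def Claim_equal_solution : Prop := ∀ (price : Int) (money : Int) (count : Int), Dom_solution price money count → Spec_solution price money count (solution price money count)

-- ===== LEMMAS AND PROOFS =====

-- A's loop sum over range(1, n+1) equals Gauss's closed form, stated multiplicatively.
theorem pv_sum_range (n : Nat) :
    (PySem.List.pyRange 1 ((n : Int) + 1) 1).foldl (fun acc i => acc + i) 0 * 2
      = (n : Int) * ((n : Int) + 1) := by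
  induction n with
  | zero => simp [PySem.List.pyRange_one_eq_nil]
  | succ m ih =>
      rw [show ((m + 1 : Nat) : Int) + 1 = ((m : Int) + 1) + 1 by push_cast; ring,
        PySem.List.pyRange_one_succ_right (by omega)]
      simp only [List.foldl_append, List.foldl_cons, List.foldl_nil]
      push_cast
      nlinarith [ih]

theorem pv_cnt_eq (count : Int) :
    (PySem.List.pyRange 1 (count + 1) 1).foldl (fun acc i => acc + i) 0
      = PySem.Int.floordiv ((if count > 0 then count else 0) * ((if count > 0 then count else 0) + 1)) 2 := by
  split_ifs with h
  · obtain ⟨n, rfl⟩ := Int.eq_ofNat_of_zero_le (le_of_lt h)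
    rw [PySem.Int.floordiv_eq_ediv_of_pos (by norm_num), ← pv_sum_range n]
    omega
  · rw [PySem.List.pyRange_one_eq_nil (by omega)]
    simp [PySem.Int.floordiv]

-- ===== VERDICT (by name: the statement is the Claim_ definition above) =====
theorem solution_spec : Claim_equal_solution := by
  intro price money count _
  unfold Spec_solution solution solution_alt
  dsimp only
  rw [pv_cnt_eq]
  generalize PySem.Int.floordiv ((if count > 0 then count else 0) * ((if count > 0 then count else 0) + 1)) 2 * price - money = v
  omega
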